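-- pv_equiv track=rewrite | github.com/amitcjmu/Stock-Analysis | backend/app/services/crewai_flows/unified_collection_flow_modules/phase_managers/gap_analysis_manager.py | _calculate_overall_severity
-- ===== SOURCE A (Python) =====
-- from typing import Any, Dict, List, Optional
--
-- def _calculate_overall_severity(gaps: List[Dict]) -> str:
--     """Calculate overall severity based on gap distribution"""
--     if not gaps:
--         return "none"
--
--     # Count gaps by severity
--     severity_counts = {"critical": 0, "high": 0, "medium": 0, "low": 0}
--
--     for gap in gaps:
--         severity = gap.get("severity", "medium")
--         if severity in severity_counts:
--             severity_counts[severity] += 1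
--
--     # Determine overall severity
--     if severity_counts["critical"] > 0:
--         return "critical"
--     elif severity_counts["high"] >= 3:
--         return "high"
--     elif severity_counts["high"] > 0 or severity_counts["medium"] >= 5:
--         return "medium"
--     else:
--         return "low"
-- ===== SOURCE B (Python) =====
-- from typing import Any, Dict, List, Optional
--
-- def _calculate_overall_severity(gaps: List[Dict]) -> str:
--     """Calculate overall severity based on gap distribution"""
--     if not gaps:
--         return "none"
--     rank = {"critical": 3, "high": 2, "medium": 1}
--     rs = sorted((rank.get(gap.get("severity", "medium"), 0) for gap in gaps), reverse=True)
--     if rs[0] == 3: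
--         return "critical"
--     if len(rs) >= 3 and rs[2] == 2:
--         return "high"
--     if rs[0] == 2 or (len(rs) >= 5 and rs[4] == 1):
--         return "medium"
--     return "low"
-- ===== Notes on version B (the rewrite author's own statement) =====
-- stated objective: alternative
-- what changed: Replaces the four-key running counter dict and threshold cascade over counts by a sort-based order statistic: each gap is mapped to a numeric rank (critical=3, high=2, medium=1, other=0), the ranks are sorted descending, and the overall severity is read off fixed positions of the sorted list (rs[0]==3 -> critical; rs[2]==2 -> at least three highs; rs[0]==2 or rs[4]==1 -> medium; else low).
import Mathlib
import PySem

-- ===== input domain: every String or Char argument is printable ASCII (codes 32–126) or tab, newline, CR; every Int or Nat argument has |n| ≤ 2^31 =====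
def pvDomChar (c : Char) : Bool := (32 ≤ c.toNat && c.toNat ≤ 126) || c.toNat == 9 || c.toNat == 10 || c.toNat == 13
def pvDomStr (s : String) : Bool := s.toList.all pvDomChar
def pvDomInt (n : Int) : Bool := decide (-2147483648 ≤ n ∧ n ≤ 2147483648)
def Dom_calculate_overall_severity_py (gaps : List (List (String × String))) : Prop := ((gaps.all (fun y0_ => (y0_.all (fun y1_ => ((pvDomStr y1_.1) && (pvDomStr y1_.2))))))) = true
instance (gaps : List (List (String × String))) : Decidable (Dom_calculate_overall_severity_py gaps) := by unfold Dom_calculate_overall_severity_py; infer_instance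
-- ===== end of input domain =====

-- B replaces A's running four-key counter dict with a sort-based order statistic: ranks sorted descending, severity read off fixed positions (alternative algorithm; same exact result).


-- ===== PORT A =====
def calculate_overall_severity_py (gaps : List (List (String × String))) : String :=
  if gaps = [] then "none"
  else
    let severity_counts : PySem.Dict String Int :=
      PySem.Dict.mk [("critical", 0), ("high", 0), ("medium", 0), ("low", 0)]
    let severity_counts := gaps.foldl (fun counts gap =>
      let severity := (PySem.Dict.mk gap).getD "severity" "medium"
      if counts.contains severity then counts.modify severity 0 (· + 1) else counts)
      severity_counts
    if severity_counts.getD "critical" 0 > 0 then "critical"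
    else if severity_counts.getD "high" 0 ≥ 3 then "high"
    else if severity_counts.getD "high" 0 > 0 ∨ severity_counts.getD "medium" 0 ≥ 5 then "medium"
    else "low"

-- ===== PORT B =====
def calculate_overall_severity_py_alt (gaps : List (List (String × String))) : String :=
  if gaps = [] then "none"
  else
    let rank : PySem.Dict String Int := PySem.Dict.mk [("critical", 3), ("high", 2), ("medium", 1)]
    let rs := PySem.List.sorted
      (gaps.map (fun gap => rank.getD ((PySem.Dict.mk gap).getD "severity" "medium") 0))
      (fun x => x) true
    if PySem.List.pyGetD rs 0 0 = 3 then "critical"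
    else if 3 ≤ PySem.List.len rs ∧ PySem.List.pyGetD rs 2 0 = 2 then "high"
    else if PySem.List.pyGetD rs 0 0 = 2 ∨ (5 ≤ PySem.List.len rs ∧ PySem.List.pyGetD rs 4 0 = 1) then "medium"
    else "low"

-- ===== PRECONDITION & SPEC =====
def Spec_calculate_overall_severity_py (gaps : List (List (String × String))) (out : String) : Prop := out = calculate_overall_severity_py_alt gaps
instance (gaps : List (List (String × String))) (out : String) : Decidable (Spec_calculate_overall_severity_py gaps out) := by unfold Spec_calculate_overall_severity_py; infer_instance

-- ===== CLAIM (what is proved, stated in full; the proofs are below) =====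
def Claim_equal_calculate_overall_severity_py : Prop := ∀ (gaps : List (List (String × String))), Dom_calculate_overall_severity_py gaps → Spec_calculate_overall_severity_py gaps (calculate_overall_severity_py gaps)

-- ===== LEMMAS AND PROOFS =====

-- severity string of a gap, and its numeric rank (B's rank dict)
def pvSev (gap : List (String × String)) : String := (PySem.Dict.mk gap).getD "severity" "medium"

def pvRank (gap : List (String × String)) : Int :=
  (PySem.Dict.mk [("critical", (3:Int)), ("high", 2), ("medium", 1)]).getD (pvSev gap) 0

lemma pvRank_cases (g : List (String × String)) :
    pvRank g = if pvSev g = "critical" then 3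
      else if pvSev g = "high" then 2
      else if pvSev g = "medium" then 1 else 0 := by
  unfold pvRank
  by_cases hc : pvSev g = "critical"
  · simp [hc, PySem.Dict.getD_eq_get?_getD, PySem.Dict.get?_mk_cons]
  · by_cases hh : pvSev g = "high"
    · simp [hh, hc, PySem.Dict.getD_eq_get?_getD, PySem.Dict.get?_mk_cons]
    · by_cases hm : pvSev g = "medium"
      · simp [hm, hc, hh, PySem.Dict.getD_eq_get?_getD, PySem.Dict.get?_mk_cons]
      · simp [hc, hh, hm, PySem.Dict.getD_eq_get?_getD, PySem.Dict.get?_mk_cons,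
          PySem.Dict.get?, Ne.symm hc, Ne.symm hh, Ne.symm hm]

lemma pvRank_le_three (g : List (String × String)) : pvRank g ≤ 3 := by
  rw [pvRank_cases]; split_ifs <;> norm_num

-- the four-key counter dict of A, with symbolic counts
def pvC4 (a h m l : Int) : PySem.Dict String Int :=
  PySem.Dict.mk [("critical", a), ("high", h), ("medium", m), ("low", l)]

-- one step of A's counting loop on the four-key dict
lemma pvC4_step (a h m l : Int) (gap : List (String × String)) :
    (if (pvC4 a h m l).contains (pvSev gap) then (pvC4 a h m l).modify (pvSev gap) 0 (· + 1) else pvC4 a h m l) =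
      if pvSev gap = "critical" then pvC4 (a+1) h m l
      else if pvSev gap = "high" then pvC4 a (h+1) m l
      else if pvSev gap = "medium" then pvC4 a h (m+1) l
      else if pvSev gap = "low" then pvC4 a h m (l+1)
      else pvC4 a h m l := by
  by_cases hc : pvSev gap = "critical"
  · rw [hc]
    simp [pvC4, PySem.Dict.modify, PySem.Dict.getD_eq_get?_getD, PySem.Dict.get?_mk_cons,
      PySem.Dict.ext_iff, PySem.Dict.items_insert_of_contains]
  · by_cases hh : pvSev gap = "high"
    · rw [hh]
      simp [pvC4, PySem.Dict.modify, PySem.Dict.getD_eq_get?_getD, PySem.Dict.get?_mk_cons,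
        PySem.Dict.ext_iff, PySem.Dict.items_insert_of_contains]
    · by_cases hm : pvSev gap = "medium"
      · rw [hm]
        simp [pvC4, PySem.Dict.modify, PySem.Dict.getD_eq_get?_getD, PySem.Dict.get?_mk_cons,
          PySem.Dict.ext_iff, PySem.Dict.items_insert_of_contains]
      · by_cases hl : pvSev gap = "low"
        · rw [hl]
          simp [pvC4, PySem.Dict.modify, PySem.Dict.getD_eq_get?_getD, PySem.Dict.get?_mk_cons,
            PySem.Dict.ext_iff, PySem.Dict.items_insert_of_contains]
        · rw [if_neg hc, if_neg hh, if_neg hm, if_neg hl, if_neg ?_]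
          simp [pvC4, PySem.Dict.contains_mk, Ne.symm hc, Ne.symm hh, Ne.symm hm, Ne.symm hl]

-- the whole counting loop, in closed form
lemma pvC4_fold (gaps : List (List (String × String))) (a h m l : Int) :
    gaps.foldl (fun counts gap =>
        if counts.contains (pvSev gap) then counts.modify (pvSev gap) 0 (· + 1) else counts)
      (pvC4 a h m l) =
    pvC4 (a + gaps.countP (fun g => pvSev g == "critical"))
         (h + gaps.countP (fun g => pvSev g == "high"))
         (m + gaps.countP (fun g => pvSev g == "medium"))
         (l + gaps.countP (fun g => pvSev g == "low")) := by
  induction gaps generalizing a h m l with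
  | nil => simp
  | cons g gs ih =>
    simp only [List.foldl_cons, pvC4_step, List.countP_cons]
    by_cases hc : pvSev g = "critical" <;> by_cases hh : pvSev g = "high" <;>
      by_cases hm : pvSev g = "medium" <;> by_cases hl : pvSev g = "low" <;>
      simp_all [ih] <;> ring_nf

lemma pvGetD_mk (a h m l : Int) :
    (PySem.Dict.mk [("critical", a), ("high", h), ("medium", m), ("low", l)]).getD "critical" 0 = a ∧
      (PySem.Dict.mk [("critical", a), ("high", h), ("medium", m), ("low", l)]).getD "high" 0 = h ∧
      (PySem.Dict.mk [("critical", a), ("high", h), ("medium", m), ("low", l)]).getD "medium" 0 = m := by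
  refine ⟨?_, ?_, ?_⟩ <;> rfl

-- in a descending list, the element at index i is ≥ v  iff  more than i elements are ≥ v
lemma pvDesc_idx (v : Int) : ∀ (rs : List Int), rs.Pairwise (fun a b => b ≤ a) →
    ∀ (i : Nat) (hi : i < rs.length),
      (v ≤ rs[i] ↔ i < rs.countP (fun x => decide (v ≤ x))) := by
  intro rs
  induction rs with
  | nil => intro _ i hi; simp at hi
  | cons x t ih =>
    intro hpw i hi
    rw [List.pairwise_cons] at hpw
    obtain ⟨hx, hpt⟩ := hpw
    cases i with
    | zero =>
      simp only [List.getElem_cons_zero, List.countP_cons]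
      constructor
      · intro hv; simp [hv]
      · intro hpos
        by_cases hvx : v ≤ x
        · exact hvx
        · exfalso
          simp only [hvx, decide_false] at hpos
          obtain ⟨y, hy, hvy⟩ := List.countP_pos_iff.mp hpos
          exact hvx (le_trans (of_decide_eq_true hvy) (hx y hy))
    | succ j =>
      have hj : j < t.length := by simpa using hi
      simp only [List.getElem_cons_succ, List.countP_cons]
      by_cases hvx : v ≤ x
      · rw [ih hpt j hj]
        simp only [hvx, decide_true, if_true]
        omega
      · constructor
        · intro hv
          exact absurd (le_trans hv (hx _ (List.getElem_mem hj))) hvx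
        · intro hlt
          exfalso
          have ht0 : t.countP (fun x => decide (v ≤ x)) = 0 := by
            rw [List.countP_eq_zero]
            intro y hy
            simp only [decide_eq_true_eq]
            exact fun hvy => hvx (le_trans hvy (hx y hy))
          simp [hvx, ht0] at hlt
  
-- countP over the descending sorted rank list equals countP of the rank predicate over gaps
lemma pvCount_sorted (gaps : List (List (String × String))) (v : Int) :
    (PySem.List.sorted (gaps.map pvRank) (fun x => x) true).countP (fun x => decide (v ≤ x)) =
      gaps.countP (fun g => decide (v ≤ pvRank g)) := by
  rw [(PySem.List.sorted_perm (gaps.map pvRank) (fun x => x) true).countP_eq, List.countP_map]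
  rfl

-- ===== VERDICT (by name: the statement is the Claim_ definition above) =====
theorem calculate_overall_severity_py_spec : Claim_equal_calculate_overall_severity_py := by
  intro gaps _
  unfold Spec_calculate_overall_severity_py calculate_overall_severity_py calculate_overall_severity_py_alt
  by_cases hnil : gaps = []
  · simp [hnil]
  · simp only [hnil, if_false]
    have hfold := pvC4_fold gaps 0 0 0 0
    simp only [pvSev, pvC4] at hfold
    rw [hfold]
    obtain ⟨h1, h2, h3⟩ := pvGetD_mk (0 + (gaps.countP (fun g => (PySem.Dict.mk g).getD "severity" "medium" == "critical") : Int))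
      (0 + (gaps.countP (fun g => (PySem.Dict.mk g).getD "severity" "medium" == "high") : Int))
      (0 + (gaps.countP (fun g => (PySem.Dict.mk g).getD "severity" "medium" == "medium") : Int))
      (0 + (gaps.countP (fun g => (PySem.Dict.mk g).getD "severity" "medium" == "low") : Int))
    rw [h1, h2, h3]
    simp only [zero_add]
    -- name B's objects
    show _ = (let rs := PySem.List.sorted (gaps.map pvRank) (fun x => x) true
      if PySem.List.pyGetD rs 0 0 = 3 then "critical"
      else if 3 ≤ PySem.List.len rs ∧ PySem.List.pyGetD rs 2 0 = 2 then "high"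
      else if PySem.List.pyGetD rs 0 0 = 2 ∨ (5 ≤ PySem.List.len rs ∧ PySem.List.pyGetD rs 4 0 = 1) then "medium"
      else "low")
    set rs := PySem.List.sorted (gaps.map pvRank) (fun x => x) true with hrs
    have hlen : rs.length = gaps.length := by
      rw [hrs, PySem.List.length_sorted, List.length_map]
    have hpw : rs.Pairwise (fun a b => b ≤ a) := PySem.List.sorted_pairwise_rev (gaps.map pvRank) (fun x => x)
    have hkv : ∀ v : Int, rs.countP (fun x => decide (v ≤ x)) = gaps.countP (fun g => decide (v ≤ pvRank g)) :=
      fun v => pvCount_sorted gaps v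
    have hidx : ∀ (i : Nat) (hi : i < rs.length) (v : Int),
        (v ≤ rs[i] ↔ i < gaps.countP (fun g => decide (v ≤ pvRank g))) := by
      intro i hi v; rw [← hkv v]; exact pvDesc_idx v rs hpw i hi
    have hub : ∀ (i : Nat) (hi : i < rs.length), rs[i] ≤ 3 := by
      intro i hi
      have hmem : rs[i] ∈ gaps.map pvRank := by
        rw [← PySem.List.mem_sorted (gaps.map pvRank) (fun x => x) true, ← hrs]
        exact List.getElem_mem hi
      obtain ⟨g, _, hg⟩ := List.mem_map.mp hmem
      rw [← hg]; exact pvRank_le_three g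
    set cC := gaps.countP (fun g => (PySem.Dict.mk g).getD "severity" "medium" == "critical") with hcC
    set cH := gaps.countP (fun g => (PySem.Dict.mk g).getD "severity" "medium" == "high") with hcH
    set cM := gaps.countP (fun g => (PySem.Dict.mk g).getD "severity" "medium" == "medium") with hcM
    have e3 : gaps.countP (fun g => decide (3 ≤ pvRank g)) = cC := by
      rw [hcC]; apply List.countP_congr; intro g _
      show decide (3 ≤ pvRank g) = true ↔ (pvSev g == "critical") = true
      rw [pvRank_cases]; split_ifs with hc hh hm <;> simp_all
    have hcount_le : ∀ p : List (String × String) → Bool, gaps.countP p ≤ rs.length := by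
      intro p; rw [hlen]; exact List.countP_le_length
    have h0 : 0 < rs.length := by
      rw [hlen]; exact List.length_pos_of_ne_nil hnil
    have hg0 : PySem.List.pyGetD rs 0 0 = rs[0] := by
      rw [show ((0:Int)) = ((0:Nat):Int) by norm_num]; exact PySem.List.pyGetD_ofNat rs 0 0 h0
    -- branch 1
    have I1 : ((0:Int) < (cC:Int)) ↔ PySem.List.pyGetD rs 0 0 = 3 := by
      rw [hg0]
      have hb := hub 0 h0
      have := hidx 0 h0 3
      rw [e3] at this
      constructor
      · intro h; have : 3 ≤ rs[0] := this.mpr (by exact_mod_cast h); omega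
      · intro h; have : 0 < cC := this.mp (by omega); exact_mod_cast this
    by_cases b1 : (0:Int) < (cC:Int)
    · rw [if_pos b1, if_pos (I1.mp b1)]
    · rw [if_neg b1, if_neg (fun h => b1 (I1.mpr h))]
      have hc0 : cC = 0 := by omega
      have hnc : ∀ g ∈ gaps, ¬(pvSev g == "critical") = true := by
        rw [hcC] at hc0
        exact List.countP_eq_zero.mp (show gaps.countP (fun g => pvSev g == "critical") = 0 from hc0)
      have e2 : gaps.countP (fun g => decide (2 ≤ pvRank g)) = cH := by
        rw [hcH]; apply List.countP_congr; intro g hg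
        have hgc := hnc g hg
        show decide (2 ≤ pvRank g) = true ↔ (pvSev g == "high") = true
        rw [pvRank_cases]; split_ifs with hc hh hm <;> simp_all
      have hub2 : ∀ (i : Nat) (hi : i < rs.length), rs[i] ≤ 2 := by
        intro i hi
        have h3i := (hidx i hi 3).not
        rw [e3, hc0] at h3i
        have := h3i.mpr (by omega)
        omega
      -- branch 2
      have I2 : ((3:Int) ≤ (cH:Int)) ↔ (3 ≤ PySem.List.len rs ∧ PySem.List.pyGetD rs 2 0 = 2) := by
        rw [PySem.List.len_eq]
        constructor
        · intro h
          have hch3 : 3 ≤ cH := by exact_mod_cast h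
          have hlen3 : 3 ≤ rs.length := le_trans hch3 (by rw [← e2]; exact hcount_le _)
          have hi2 : 2 < rs.length := by omega
          have hge : 2 ≤ rs[2] := (hidx 2 hi2 2).mpr (by rw [e2]; omega)
          have hle := hub2 2 hi2
          refine ⟨by exact_mod_cast hlen3, ?_⟩
          rw [show ((2:Int)) = ((2:Nat):Int) by norm_num, PySem.List.pyGetD_ofNat rs 2 0 hi2]
          omega
        · rintro ⟨hl3, hr2⟩
          have hi2 : 2 < rs.length := by exact_mod_cast (by omega : (2:Int) < (rs.length:Int)) 
          rw [show ((2:Int)) = ((2:Nat):Int) by norm_num, PySem.List.pyGetD_ofNat rs 2 0 hi2] at hr2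
          have := (hidx 2 hi2 2).mp (by omega)
          rw [e2] at this
          exact_mod_cast (by omega : (3:Nat) ≤ cH)
      by_cases b2 : (3:Int) ≤ (cH:Int)
      · rw [if_pos b2, if_pos (I2.mp b2)]
      · rw [if_neg b2, if_neg (fun h => b2 (I2.mpr h))]
        -- branch 3
        have J : ((0:Int) < (cH:Int)) ↔ PySem.List.pyGetD rs 0 0 = 2 := by
          rw [hg0]
          have hb := hub2 0 h0
          have hi := hidx 0 h0 2
          rw [e2] at hi
          constructor
          · intro h; have : 2 ≤ rs[0] := hi.mpr (by exact_mod_cast h); omega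
          · intro h; have : 0 < cH := hi.mp (by omega); exact_mod_cast this
        by_cases b3 : (0:Int) < (cH:Int)
        · rw [if_pos (Or.inl b3), if_pos (Or.inl (J.mp b3))]
        · have hh0 : cH = 0 := by omega
          have hnh : ∀ g ∈ gaps, ¬(pvSev g == "high") = true := by
            rw [hcH] at hh0
            exact List.countP_eq_zero.mp (show gaps.countP (fun g => pvSev g == "high") = 0 from hh0)
          have e1 : gaps.countP (fun g => decide (1 ≤ pvRank g)) = cM := by
            rw [hcM]; apply List.countP_congr; intro g hg
            have h1g := hnc g hg
            have h2g := hnh g hg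
            show decide (1 ≤ pvRank g) = true ↔ (pvSev g == "medium") = true
            rw [pvRank_cases]; split_ifs with hc hh hm <;> simp_all
          have hub1 : ∀ (i : Nat) (hi : i < rs.length), rs[i] ≤ 1 := by
            intro i hi
            have h2i := (hidx i hi 2).not
            rw [e2, hh0] at h2i
            have := h2i.mpr (by omega)
            omega
          have I3 : ((5:Int) ≤ (cM:Int)) ↔ (5 ≤ PySem.List.len rs ∧ PySem.List.pyGetD rs 4 0 = 1) := by
            rw [PySem.List.len_eq]
            constructor
            · intro h
              have hcm5 : 5 ≤ cM := by exact_mod_cast h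
              have hlen5 : 5 ≤ rs.length := le_trans hcm5 (by rw [← e1]; exact hcount_le _)
              have hi4 : 4 < rs.length := by omega
              have hge : 1 ≤ rs[4] := (hidx 4 hi4 1).mpr (by rw [e1]; omega)
              have hle := hub1 4 hi4
              refine ⟨by exact_mod_cast hlen5, ?_⟩
              rw [show ((4:Int)) = ((4:Nat):Int) by norm_num, PySem.List.pyGetD_ofNat rs 4 0 hi4]
              omega
            · rintro ⟨hl5, hr1⟩
              have hi4 : 4 < rs.length := by exact_mod_cast (by omega : (4:Int) < (rs.length:Int))
              rw [show ((4:Int)) = ((4:Nat):Int) by norm_num, PySem.List.pyGetD_ofNat rs 4 0 hi4] at hr1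
              have := (hidx 4 hi4 1).mp (by omega)
              rw [e1] at this
              exact_mod_cast (by omega : (5:Nat) ≤ cM)
          by_cases b4 : (5:Int) ≤ (cM:Int)
          · rw [if_pos (Or.inr b4), if_pos (Or.inr (I3.mp b4))]
          · rw [if_neg ?_, if_neg ?_]
            · rintro (h | h)
              · exact (fun hh => b3 (J.mpr hh)) h |>.elim
              · exact b4 (I3.mpr h)
            · rintro (h | h)
              · exact b3 h
              · exact b4 h
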